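-- pv_equiv track=rewrite | github.com/doocs/leetcode | lcp/LCP 08. 剧情触发时间/Solution.py | getTriggerTime
-- ===== SOURCE A (Python) =====
-- from typing import List
--
-- def getTriggerTime(increase: List[List[int]], requirements: List[List[int]]) -> List[int]:
--     increase.insert(0, [0,0,0])
--     for i in range(1, len(increase)):
--         for j in range(3):
--             increase[i][j] += increase[i-1][j]
--
--     res = [None for _ in range(len(requirements))]
--     maxs = increase[-1]
--     for i in range(len(requirements)):
--         # value in requirements beyond the limit
--         if any(a > b for a, b in zip(requirements[i], maxs)):
--             res[i] = -1
--             continue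
--         # else
--         left, right = 0, len(increase) - 1
--         while left <= right:
--             mid = (left + right) // 2
--             if all(a >= b for a, b in zip(increase[mid], requirements[i])):
--                 right = mid - 1
--                 res[i] = mid
--             else:
--                 left = mid + 1
--
--     return res
-- ===== SOURCE B (Python) =====
-- def getTriggerTime(increase, requirements):
--     # Return-value equivalence only: unlike A, B does not mutate `increase`.
--     days = [(0, 0, 0)]
--     for a, b, c in increase:
--         x, y, z = days[-1]
--         days.append((x + a, y + b, z + c))
--     return [next((d for d, cur in enumerate(days)
--                   if all(c >= r for c, r in zip(cur, req))), -1)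
--             for req in requirements]
-- ===== Notes on version B (the rewrite author's own statement) =====
-- stated objective: simpler
-- what changed: Replaces A's in-place index-mutating prefix-sum loop, separate -1 limit test and per-query binary search by a non-mutating prefix-sum of (C,R,H) triples and a single first-satisfying-day linear scan defaulting to -1; Pre_ keeps to the problem's three-attribute domain (increase rows of length exactly 3, shorter rows raise in both programs) and to inputs where each requirement's satisfaction is monotone along the cumulative table (with negative increases A's binary search returns an accident of probe order).
-- outside the precondition, e.g. on getTriggerTime([[1, 1, 1, 0]], [[0, 0, 0, 1]]): A returns [-1], B raises ValueError; on getTriggerTime([[-3, 2, 3]], [[0]]): A returns [-1], B returns [0]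
import Mathlib
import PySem

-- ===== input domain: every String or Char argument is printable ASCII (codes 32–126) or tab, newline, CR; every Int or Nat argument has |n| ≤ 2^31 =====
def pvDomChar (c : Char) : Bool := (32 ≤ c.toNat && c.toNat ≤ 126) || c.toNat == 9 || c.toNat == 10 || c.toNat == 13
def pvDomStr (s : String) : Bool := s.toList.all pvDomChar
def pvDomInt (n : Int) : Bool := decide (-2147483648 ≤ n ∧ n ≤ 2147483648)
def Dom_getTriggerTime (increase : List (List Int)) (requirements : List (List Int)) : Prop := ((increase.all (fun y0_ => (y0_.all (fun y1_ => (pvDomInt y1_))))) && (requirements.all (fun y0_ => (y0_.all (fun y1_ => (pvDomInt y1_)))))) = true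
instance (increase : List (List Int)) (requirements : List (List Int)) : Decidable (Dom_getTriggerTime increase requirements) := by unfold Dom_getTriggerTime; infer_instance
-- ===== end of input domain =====

-- B replaces A's in-place index-mutating prefix-sum loop and per-query binary search (with its
-- separate -1 limit test) by a non-mutating prefix-sum of attribute triples and a single
-- first-satisfying-day linear scan defaulting to -1 (objective: simpler).  Equivalence is about
-- the RETURN value only: A mutates `increase` in place, B does not.

-- ===== PORT A =====
-- for j in range(3): increase[i][j] += increase[i-1][j]
def pvAStep (inc : List (List Int)) (i : Int) : List (List Int) :=
  (PySem.List.pyRange 0 3 1).foldl (fun inc2 j =>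
    PySem.List.pySetD inc2 i
      (PySem.List.pySetD (PySem.List.pyGetD inc2 i [])
        j
        (PySem.List.pyGetD (PySem.List.pyGetD inc2 i []) j 0 +
         PySem.List.pyGetD (PySem.List.pyGetD inc2 (i - 1) []) j 0))) inc

-- while left <= right: …  (Python's res starts as None and is always overwritten inside Pre_;
-- -2 is the port's placeholder for the never-returned None)
def pvABS (inc : List (List Int)) (req : List Int) (left right res : Int) : Int :=
  if h : left ≤ right then
    let mid := PySem.Int.floordiv (left + right) 2
    if ((PySem.List.pyGetD inc mid []).zip req).all (fun p => decide (p.2 ≤ p.1)) then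
      pvABS inc req left (mid - 1) mid
    else
      pvABS inc req (mid + 1) right res
  else res
termination_by (right + 1 - left).toNat
decreasing_by
  · have hm := PySem.Int.floordiv_two_mid_bounds h
    omega
  · have hm := PySem.Int.floordiv_two_mid_bounds h
    omega

def getTriggerTime (increase : List (List Int)) (requirements : List (List Int)) : List Int :=
  let inc0 := PySem.List.insert increase 0 [0, 0, 0]
  let inc := (PySem.List.pyRange 1 (inc0.length : Int) 1).foldl pvAStep inc0
  let maxs := PySem.List.pyGetD inc (-1) []
  requirements.map (fun req =>
    if (req.zip maxs).any (fun p => decide (p.2 < p.1)) then (-1 : Int)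
    else pvABS inc req 0 ((inc.length : Int) - 1) (-2))

-- ===== PORT B =====
-- for a, b, c in increase: days.append((x+a, y+b, z+c))
-- ('for a, b, c in …' raises ValueError on a row not of length 3: the port's catch-all
-- branch is reached only outside Pre_; rows of `days` are built with length 3, so the
-- x, y, z unpacking of days[-1] is ported with getD)
def pvBStep (days : List (List Int)) (row : List Int) : List (List Int) :=
  match row with
  | [a, b, c] =>
    let last := PySem.List.pyGetD days (-1) []
    days ++ [[last.getD 0 0 + a, last.getD 1 0 + b, last.getD 2 0 + c]]
  | _ => days

def getTriggerTime_alt (increase : List (List Int)) (requirements : List (List Int)) : List Int :=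
  let days := increase.foldl pvBStep [[0, 0, 0]]
  requirements.map (fun req =>
    match (PySem.List.enumerate days 0).find?
        (fun p => (p.2.zip req).all (fun q => decide (q.2 ≤ q.1))) with
    | some p => p.1
    | none => -1)

-- ===== PRECONDITION & SPEC =====
-- the cumulative-sum table both programs build ([0,0,0] prepended, per-dimension prefix sums)
def pvCum (prev : List Int) : List (List Int) → List (List Int)
  | [] => []
  | row :: rest =>
    let nr := [prev.getD 0 0 + row.getD 0 0, prev.getD 1 0 + row.getD 1 0,
               prev.getD 2 0 + row.getD 2 0]
    nr :: pvCum nr rest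

-- Pre_ keeps to the problem's three-attribute domain and to inputs where A's binary search is
-- meaningful: it excludes (a) increase rows not of length 3 (shorter rows raise IndexError in A
-- and ValueError in B; longer rows are outside the three-attribute domain and B raises ValueError
-- on them), and (b) inputs on which some requirement's satisfaction is not monotone along the
-- cumulative-sum table (possible when increases are negative): there A's binary search returns an
-- accident of the probe order, not the earliest satisfying day.
def Pre_getTriggerTime (increase : List (List Int)) (requirements : List (List Int)) : Prop :=
  (∀ row ∈ increase, row.length = 3) ∧
  (∀ req ∈ requirements, ∀ (d : Nat), d < (pvCum [0,0,0] increase).length →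
    (((([0,0,0] :: pvCum [0,0,0] increase).getD d []).zip req).all
      (fun p => decide (p.2 ≤ p.1))) = true →
    ((((pvCum [0,0,0] increase).getD d []).zip req).all
      (fun p => decide (p.2 ≤ p.1))) = true)
instance (increase : List (List Int)) (requirements : List (List Int)) : Decidable (Pre_getTriggerTime increase requirements) := by unfold Pre_getTriggerTime; infer_instance

def pvWitness_getTriggerTime : List (List Int) × List (List Int) :=
  ([[2, 8, 4], [2, 1, 1], [0, 0, 8]], [[2, 8, 8], [4, 9, 12], [100, 0, 0]])

def Spec_getTriggerTime (increase : List (List Int)) (requirements : List (List Int)) (out : List Int) : Prop := out = getTriggerTime_alt increase requirements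
instance (increase : List (List Int)) (requirements : List (List Int)) (out : List Int) : Decidable (Spec_getTriggerTime increase requirements out) := by unfold Spec_getTriggerTime; infer_instance

-- ===== CLAIM (what is proved, stated in full; the proofs are below) =====
def Claim_equal_getTriggerTime : Prop := ∀ (increase : List (List Int)) (requirements : List (List Int)), Dom_getTriggerTime increase requirements → Pre_getTriggerTime increase requirements → Spec_getTriggerTime increase requirements (getTriggerTime increase requirements)

-- ===== LEMMAS AND PROOFS =====

theorem pvGetD_one (l : List Int) : PySem.List.pyGetD l 1 0 = l.getD 1 0 := by
  have := PySem.List.pyGetD_natCast (xs := l) (n := 1) (d := (0:Int)); simpa using this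

theorem pvGetD_two (l : List Int) : PySem.List.pyGetD l 2 0 = l.getD 2 0 := by
  have := PySem.List.pyGetD_natCast (xs := l) (n := 2) (d := (0:Int)); simpa using this

theorem pvGet0 (a : Int) (l : List Int) : PySem.List.pyGetD (a :: l) 0 0 = a :=
  PySem.List.pyGetD_zero_cons a l 0

theorem pvGet1 (a b : Int) (l : List Int) : PySem.List.pyGetD (a :: b :: l) 1 0 = b := by
  rw [pvGetD_one]; rfl

theorem pvGet2 (a b c : Int) (l : List Int) : PySem.List.pyGetD (a :: b :: c :: l) 2 0 = c := by
  rw [pvGetD_two]; rfl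

theorem pvSet0 (a v : Int) (l : List Int) : PySem.List.pySetD (a :: l) 0 v = v :: l := by
  simp [PySem.List.pySetD, PySem.List.pySet?, PySem.List.pyIdx?]

theorem pvSet1 (a b v : Int) (l : List Int) : PySem.List.pySetD (a :: b :: l) 1 v = a :: v :: l := by
  simp [PySem.List.pySetD, PySem.List.pySet?, PySem.List.pyIdx?]

theorem pvSet2 (a b c v : Int) (l : List Int) :
    PySem.List.pySetD (a :: b :: c :: l) 2 v = a :: b :: v :: l := by
  have h : (2:Int) ≤ (l.length:Int) + 1 + 1 := by omega
  simp [PySem.List.pySetD, PySem.List.pySet?, PySem.List.pyIdx?, h]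

theorem pvGetMid (done rest : List (List Int)) (cur : List Int) :
    PySem.List.pyGetD (done ++ cur :: rest) (done.length : Int) [] = cur := by
  simp [List.getD]

theorem pvGetPrev (done rest : List (List Int)) (cur : List Int) (hne : done ≠ []) :
    PySem.List.pyGetD (done ++ cur :: rest) ((done.length : Int) - 1) [] = done.getLast hne := by
  have hpos : 0 < done.length := List.length_pos_of_ne_nil hne
  have h1 : ((done.length : Int) - 1) = ((done.length - 1 : Nat) : Int) := by omega
  rw [h1, PySem.List.pyGetD_natCast, List.getD, List.getElem?_append]
  simp [List.getLast_eq_getElem, Nat.sub_lt hpos]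

theorem pvSetMid (done rest : List (List Int)) (cur v : List Int) :
    PySem.List.pySetD (done ++ cur :: rest) (done.length : Int) v = done ++ v :: rest := by
  rw [PySem.List.pySetD_natCast]
  rw [List.set_append_right _ _ (Nat.le_refl _)]
  simp

-- one iteration of A's inner for-j loop, on a state split as done ++ cur :: rest
theorem pvAStep_sub (done rest : List (List Int)) (cur : List Int) (hne : done ≠ []) (j : Int) :
    PySem.List.pySetD (done ++ cur :: rest) (done.length : Int)
      (PySem.List.pySetD (PySem.List.pyGetD (done ++ cur :: rest) (done.length : Int) [])
        j
        (PySem.List.pyGetD (PySem.List.pyGetD (done ++ cur :: rest) (done.length : Int) []) j 0 +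
         PySem.List.pyGetD (PySem.List.pyGetD (done ++ cur :: rest) ((done.length : Int) - 1) []) j 0))
    = done ++ (PySem.List.pySetD cur j
        (PySem.List.pyGetD cur j 0 + PySem.List.pyGetD (done.getLast hne) j 0)) :: rest := by
  rw [pvGetMid, pvGetPrev done rest cur hne, pvSetMid]

-- A's inner loop turns row `cur` into prev + cur on the first three columns
theorem pvAStep_eq (done rest : List (List Int)) (cur : List Int) (hne : done ≠ [])
    (hc : 3 ≤ cur.length) (hp : 3 ≤ (done.getLast hne).length) :
    pvAStep (done ++ cur :: rest) (done.length : Int)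
    = done ++ ([(done.getLast hne).getD 0 0 + cur.getD 0 0,
                (done.getLast hne).getD 1 0 + cur.getD 1 0,
                (done.getLast hne).getD 2 0 + cur.getD 2 0] ++ cur.drop 3) :: rest := by
  obtain ⟨c0, c1, c2, ct, rfl⟩ : ∃ c0 c1 c2 ct, cur = c0 :: c1 :: c2 :: ct := by
    match cur, hc with
    | c0 :: c1 :: c2 :: ct, _ => exact ⟨c0, c1, c2, ct, rfl⟩
  obtain ⟨p0, p1, p2, pt, hpl⟩ : ∃ p0 p1 p2 pt, done.getLast hne = p0 :: p1 :: p2 :: pt := by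
    match h : done.getLast hne, hp with
    | p0 :: p1 :: p2 :: pt, _ => exact ⟨p0, p1, p2, pt, rfl⟩
  unfold pvAStep
  rw [(by decide : PySem.List.pyRange 0 3 1 = [0, 1, 2])]
  simp only [List.foldl_cons, List.foldl_nil]
  rw [pvAStep_sub done rest _ hne 0]
  rw [hpl, pvGet0, pvSet0]
  rw [pvAStep_sub done rest _ hne 1]
  rw [hpl, pvGet1, pvSet1]
  rw [pvAStep_sub done rest _ hne 2]
  rw [hpl, pvGet2, pvSet2]
  simp [List.getD, pvGet1, pvGet2]
  refine ⟨by omega, by omega, by omega⟩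

-- A's outer loop builds the cumulative table (rows have length exactly 3, so the trailing
-- `cur.drop 3` of pvAStep_eq is empty and the rows are exactly pvCum's)
theorem pvA_loop : ∀ (rest done : List (List Int)) (hne : done ≠ [])
    (hr : ∀ row ∈ rest, row.length = 3) (hp : 3 ≤ (done.getLast hne).length),
    (PySem.List.pyRange (done.length : Int) ((done.length : Int) + (rest.length : Int)) 1).foldl
      pvAStep (done ++ rest)
    = done ++ pvCum (done.getLast hne) rest := by
  intro rest
  induction rest with
  | nil => intro done hne _ _; simp [pvCum, PySem.List.pyRange_one_eq_nil]
  | cons row rest' ih =>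
    intro done hne hr hp
    have hrow3 : row.length = 3 := hr row (by simp)
    have hdrop : row.drop 3 = [] := List.drop_eq_nil_of_le (by omega)
    have hlt : (done.length : Int) < (done.length : Int) + ((row :: rest').length : Int) := by
      simp
    rw [PySem.List.pyRange_one_cons hlt, List.foldl_cons,
      pvAStep_eq done rest' row hne (by omega) hp]
    rw [hdrop]
    have hassoc : done ++ ([(done.getLast hne).getD 0 0 + row.getD 0 0,
        (done.getLast hne).getD 1 0 + row.getD 1 0,
        (done.getLast hne).getD 2 0 + row.getD 2 0] ++ []) :: rest'
        = (done ++ [[(done.getLast hne).getD 0 0 + row.getD 0 0,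
        (done.getLast hne).getD 1 0 + row.getD 1 0,
        (done.getLast hne).getD 2 0 + row.getD 2 0]]) ++ rest' := by simp
    rw [hassoc]
    have hrange : (PySem.List.pyRange ((done.length : Int) + 1)
        ((done.length : Int) + ((row :: rest').length : Int)) 1)
        = PySem.List.pyRange (((done ++ [[(done.getLast hne).getD 0 0 + row.getD 0 0,
            (done.getLast hne).getD 1 0 + row.getD 1 0,
            (done.getLast hne).getD 2 0 + row.getD 2 0]]).length : Int))
          (((done ++ [[(done.getLast hne).getD 0 0 + row.getD 0 0,
            (done.getLast hne).getD 1 0 + row.getD 1 0,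
            (done.getLast hne).getD 2 0 + row.getD 2 0]]).length : Int)
            + (rest'.length : Int)) 1 := by
      congr 1 <;> (simp; try omega)
    rw [hrange, ih _ (by simp) (fun r hmem => hr r (by simp [hmem])) (by simp)]
    simp [pvCum]

-- B's fold builds the same table
theorem pvBStep_eq (done : List (List Int)) (a b c : Int) (hne : done ≠ []) :
    pvBStep done [a, b, c] = done ++ [[(done.getLast hne).getD 0 0 + a,
      (done.getLast hne).getD 1 0 + b, (done.getLast hne).getD 2 0 + c]] := by
  unfold pvBStep
  rw [PySem.List.pyGetD_neg_one _ _ hne]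

theorem pvB_fold (l : List (List Int)) : ∀ (done : List (List Int)) (hne : done ≠ []),
    (∀ row ∈ l, row.length = 3) →
    l.foldl pvBStep done = done ++ pvCum (done.getLast hne) l := by
  induction l with
  | nil => intro done hne _; simp [pvCum]
  | cons row rest ih =>
    intro done hne hr
    obtain ⟨a, b, c, rfl⟩ : ∃ a b c, row = [a, b, c] := by
      match row, hr row (by simp) with
      | [a, b, c], _ => exact ⟨a, b, c, rfl⟩
    rw [List.foldl_cons, pvBStep_eq done a b c hne]
    rw [ih _ (by simp) (fun r hmem => hr r (by simp [hmem]))]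
    simp [pvCum]

-- A's binary search: no satisfying index in [left, right] leaves res unchanged
theorem pvABS_none (inc : List (List Int)) (req : List Int) :
    ∀ (n : Nat) (left right res : Int), (right + 1 - left).toNat ≤ n →
    (∀ d, left ≤ d → d ≤ right →
      (((PySem.List.pyGetD inc d []).zip req).all (fun p => decide (p.2 ≤ p.1))) = false) →
    pvABS inc req left right res = res := by
  intro n
  induction n with
  | zero =>
    intro left right res hn _
    rw [pvABS, dif_neg (by omega)]
  | succ n ih =>
    intro left right res hn hF
    rw [pvABS]
    by_cases h : left ≤ right
    · rw [dif_pos h]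
      have hm := PySem.Int.floordiv_two_mid_bounds h
      dsimp only
      rw [if_neg (by rw [hF _ hm.1 hm.2]; exact Bool.false_ne_true)]
      exact ih _ _ _ (by omega) (fun d h1 h2 => hF d (by omega) h2)
    · rw [dif_neg h]

-- A's binary search returns the least satisfying index, for a monotone predicate
theorem pvABS_found (inc : List (List Int)) (req : List Int) :
    ∀ (n : Nat) (left right res m : Int), (right + 1 - left).toNat ≤ n →
    (∀ d e, left ≤ d → d ≤ e → e ≤ right →
      (((PySem.List.pyGetD inc d []).zip req).all (fun p => decide (p.2 ≤ p.1))) = true →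
      (((PySem.List.pyGetD inc e []).zip req).all (fun p => decide (p.2 ≤ p.1))) = true) →
    left ≤ m → m ≤ right →
    (((PySem.List.pyGetD inc m []).zip req).all (fun p => decide (p.2 ≤ p.1))) = true →
    (∀ d, left ≤ d → d < m →
      (((PySem.List.pyGetD inc d []).zip req).all (fun p => decide (p.2 ≤ p.1))) = false) →
    pvABS inc req left right res = m := by
  intro n
  induction n with
  | zero =>
    intro left right res m hn _ h1 h2 _ _
    omega
  | succ n ih =>
    intro left right res m hn hmono h1 h2 hPm hmin
    have h : left ≤ right := by omega
    rw [pvABS, dif_pos h]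
    have hm := PySem.Int.floordiv_two_mid_bounds h
    dsimp only
    by_cases hP : (((PySem.List.pyGetD inc (PySem.Int.floordiv (left + right) 2) []).zip req).all
        (fun p => decide (p.2 ≤ p.1))) = true
    · rw [if_pos hP]
      have hmle : m ≤ PySem.Int.floordiv (left + right) 2 := by
        by_contra hc
        rw [hmin _ hm.1 (by omega)] at hP
        exact absurd hP (by simp)
      by_cases hmeq : m = PySem.Int.floordiv (left + right) 2
      · rw [← hmeq]
        exact pvABS_none inc req ((m - left).toNat) left (m - 1) m (by omega)
          (fun d hd1 hd2 => hmin d hd1 (by omega))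
      · exact ih _ _ _ _ (by omega)
          (fun d e hd he1 he2 => hmono d e hd he1 (by omega)) h1 (by omega) hPm hmin
    · rw [if_neg hP]
      have hgt : PySem.Int.floordiv (left + right) 2 < m := by
        by_contra hc
        exact hP (hmono m (PySem.Int.floordiv (left + right) 2) h1 (by omega) hm.2 hPm)
      exact ih _ _ _ _ (by omega)
        (fun d e hd he1 he2 => hmono d e (by omega) he1 he2) (by omega) h2 hPm
        (fun d hd1 hd2 => hmin d (by omega) hd2)

-- zip/all as an indexed statement
theorem pvq_iff (cur req : List Int) :
    (((cur.zip req).all (fun p => decide (p.2 ≤ p.1))) = true) ↔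
    ∀ (j : Nat) (h1 : j < cur.length) (h2 : j < req.length), req[j] ≤ cur[j] := by
  rw [List.all_eq_true]
  constructor
  · intro h j h1 h2
    have hj : j < (cur.zip req).length := by simp [List.length_zip]; omega
    have := h (cur.zip req)[j] (List.getElem_mem hj)
    rw [List.getElem_zip] at this
    simpa using this
  · intro h p hp
    rw [List.mem_iff_getElem] at hp
    obtain ⟨i, hi, rfl⟩ := hp
    have hi' : i < cur.length ∧ i < req.length := by
      simp [List.length_zip] at hi; omega
    rw [List.getElem_zip]
    simpa using h i hi'.1 hi'.2

-- A's -1 test is the negation of the last row satisfying the requirement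
theorem pvany_iff (req maxs : List Int) :
    (((req.zip maxs).any (fun p => decide (p.2 < p.1))) = true) ↔
    ¬ (((maxs.zip req).all (fun p => decide (p.2 ≤ p.1))) = true) := by
  rw [pvq_iff, List.any_eq_true]
  constructor
  · rintro ⟨p, hp, hlt⟩ hall
    rw [List.mem_iff_getElem] at hp
    obtain ⟨i, hi, rfl⟩ := hp
    have hi' : i < req.length ∧ i < maxs.length := by
      simp [List.length_zip] at hi; omega
    rw [List.getElem_zip] at hlt
    simp at hlt
    exact absurd (hall i hi'.2 hi'.1) (by omega)
  · intro hno
    push_neg at hno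
    obtain ⟨j, h1, h2, hlt⟩ := hno
    refine ⟨(req[j], maxs[j]), ?_, by simpa using hlt⟩
    rw [List.mem_iff_getElem]
    exact ⟨j, by simp [List.length_zip]; omega, by rw [List.getElem_zip]⟩

-- B's scan: find? over enumerate, none / first-hit cases
theorem pvFind_none (q : List Int → Bool) :
    ∀ (l : List (List Int)) (s : Int), (∀ x ∈ l, q x = false) →
    (PySem.List.enumerate l s).find? (fun p => q p.2) = none := by
  intro l
  induction l with
  | nil => intro s _; simp [PySem.List.enumerate_nil]
  | cons x t ih =>
    intro s hF
    rw [PySem.List.enumerate_cons, List.find?_cons_of_neg (by simp [hF x (by simp)])]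
    exact ih _ (fun y hy => hF y (by simp [hy]))

theorem pvFind_some (q : List Int → Bool) :
    ∀ (l : List (List Int)) (s : Int) (k : Nat) (hk : k < l.length),
    q l[k] = true → (∀ (j : Nat) (hj : j < k), q (l[j]'(by omega)) = false) →
    (PySem.List.enumerate l s).find? (fun p => q p.2) = some (s + k, l[k]) := by
  intro l
  induction l with
  | nil => intro s k hk _ _; simp at hk
  | cons x t ih =>
    intro s k hk hq hmin
    match k with
    | 0 =>
      rw [PySem.List.enumerate_cons, List.find?_cons_of_pos (by simpa using hq)]
      simp
    | k' + 1 =>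
      rw [PySem.List.enumerate_cons,
        List.find?_cons_of_neg (by simpa using hmin 0 (by omega))]
      rw [ih (s + 1) k' (by simpa using hk) (by simpa using hq)
        (fun j hj => by simpa using hmin (j + 1) (by omega))]
      congr 1
      simp
      omega

theorem pvWitness_ok : Dom_getTriggerTime pvWitness_getTriggerTime.1 pvWitness_getTriggerTime.2 ∧
    Pre_getTriggerTime pvWitness_getTriggerTime.1 pvWitness_getTriggerTime.2 := by
  constructor <;> decide

-- ===== VERDICT (by name: the statement is the Claim_ definition above) =====
theorem getTriggerTime_spec : Claim_equal_getTriggerTime := by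
  intro increase requirements _ hPre
  unfold Spec_getTriggerTime getTriggerTime getTriggerTime_alt
  rw [PySem.List.insert_zero]
  dsimp only
  -- both loops build the same table pre
  have hA : (PySem.List.pyRange 1 ((([0,0,0] :: increase : List (List Int)).length : Int)) 1).foldl
      pvAStep ([0,0,0] :: increase)
      = [[0,0,0]] ++ pvCum [0,0,0] increase := by
    have hrange : (PySem.List.pyRange 1 ((([0,0,0] :: increase : List (List Int)).length : Int)) 1)
        = PySem.List.pyRange ((([[0,0,0]] : List (List Int)).length : Int))
            ((([[0,0,0]] : List (List Int)).length : Int) + (increase.length : Int)) 1 := by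
      congr 1 <;> (simp; try omega)
    rw [hrange]
    have := pvA_loop increase [[0,0,0]] (by simp)
      (fun row hmem => hPre.1 row hmem) (by simp)
    simpa using this
  rw [hA, pvB_fold increase [[0,0,0]] (by simp) (fun row hmem => hPre.1 row hmem)]
  simp only [List.getLast_singleton, List.singleton_append]
  set pre := [0,0,0] :: pvCum [0,0,0] increase with hpre
  have hprene : pre ≠ [] := by simp [hpre]
  have hN : 0 < pre.length := List.length_pos_of_ne_nil hprene
  -- per-requirement equality
  apply List.map_congr_left
  intro req hreq
  -- satisfaction is monotone along pre, from Pre_'s per-requirement condition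
  have hlen : pre.length = (pvCum [0,0,0] increase).length + 1 := by rw [hpre]; simp
  have hstep : ∀ (d : Nat) (hd : d + 1 < pre.length),
      ((((pre[d]'(by omega)).zip req).all (fun p => decide (p.2 ≤ p.1))) = true) →
      ((((pre[d+1]'hd).zip req).all (fun p => decide (p.2 ≤ p.1))) = true) := by
    intro d hd hq
    have h2 := hPre.2 req hreq d (by omega)
    rw [List.getD_eq_getElem _ [] (n := d) (by simp; omega),
      List.getD_eq_getElem _ [] (n := d) (by omega)] at h2
    have hq' := h2 (by exact hq)
    have hcs : ([0,0,0] :: pvCum [0,0,0] increase : List (List Int))[d+1]'(by simp; omega)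
        = (pvCum [0,0,0] increase)[d]'(by omega) := List.getElem_cons_succ ..
    rw [← hcs] at hq'
    exact hq'
  have hchain : ∀ (k e : Nat) (hke : k ≤ e) (he : e < pre.length),
      ((((pre[k]'(by omega)).zip req).all (fun p => decide (p.2 ≤ p.1))) = true) →
      ((((pre[e]'he).zip req).all (fun p => decide (p.2 ≤ p.1))) = true) := by
    intro k e hke
    induction e, hke using Nat.le_induction with
    | base => intro _ hq; exact hq
    | succ e hke ih =>
      intro he hq
      exact hstep e he (ih (by omega) hq)
  have hmaxs : PySem.List.pyGetD pre (-1) [] = pre[pre.length - 1] := by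
    rw [PySem.List.pyGetD_neg_one _ _ hprene, List.getLast_eq_getElem]
  by_cases hc : ((req.zip (PySem.List.pyGetD pre (-1) [])).any
      (fun p => decide (p.2 < p.1))) = true
  · -- A returns -1; no index satisfies, so B's scan also returns -1
    rw [if_pos hc]
    have hlastF := (pvany_iff req _).mp hc
    rw [hmaxs] at hlastF
    have hF : ∀ x ∈ pre, ((x.zip req).all (fun p => decide (p.2 ≤ p.1))) = false := by
      intro x hx
      rw [List.mem_iff_getElem] at hx
      obtain ⟨k, hk, rfl⟩ := hx
      by_contra hxc
      exact hlastF (hchain k (pre.length - 1) (by omega) (by omega)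
        (by simpa using Bool.of_not_eq_false hxc))
    rw [pvFind_none _ pre 0 hF]
  · -- the last row satisfies; both sides return the least satisfying index
    rw [if_neg hc]
    have hlastT : (((pre[pre.length - 1]).zip req).all (fun p => decide (p.2 ≤ p.1))) = true := by
      have := (pvany_iff req (PySem.List.pyGetD pre (-1) [])).not.mp hc
      rw [not_not, hmaxs] at this
      exact this
    have hex : ∃ k, k < pre.length ∧
        (((pre.getD k []).zip req).all (fun p => decide (p.2 ≤ p.1))) = true := by
      exact ⟨pre.length - 1, by omega, by rw [List.getD_eq_getElem pre [] (by omega)]; exact hlastT⟩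
    obtain ⟨m, hm⟩ : ∃ m, m = Nat.find hex := ⟨_, rfl⟩
    have hspec := Nat.find_spec hex
    rw [← hm] at hspec
    have hmlt : m < pre.length := hspec.1
    have hmq : (((pre[m]'hmlt).zip req).all (fun p => decide (p.2 ≤ p.1))) = true := by
      have := hspec.2
      rwa [List.getD_eq_getElem pre [] hmlt] at this
    have hmmin : ∀ (j : Nat) (hj : j < m),
        (((pre[j]'(Nat.lt_trans hj hmlt)).zip req).all (fun p => decide (p.2 ≤ p.1))) = false := by
      intro j hj
      have hmin' := Nat.find_min hex (by omega : j < Nat.find hex)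
      by_contra hjc
      apply hmin'
      refine ⟨by omega, ?_⟩
      rw [List.getD_eq_getElem pre [] (by omega)]
      exact Bool.of_not_eq_false hjc
    -- A side
    have hAr : pvABS pre req 0 ((pre.length : Int) - 1) (-2) = (m : Int) := by
      apply pvABS_found pre req pre.length 0 ((pre.length : Int) - 1) (-2) (m : Int)
        (by omega)
      · intro d e hd hde he hPd
        have hd' : PySem.List.pyGetD pre d [] = pre[d.toNat]'(by omega) :=
          PySem.List.pyGetD_eq_getElem _ _ (by omega) (by omega)
        have he' : PySem.List.pyGetD pre e [] = pre[e.toNat]'(by omega) :=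
          PySem.List.pyGetD_eq_getElem _ _ (by omega) (by omega)
        rw [he']
        rw [hd'] at hPd
        exact hchain d.toNat e.toNat (by omega) (by omega) hPd
      · omega
      · omega
      · rw [PySem.List.pyGetD_eq_getElem _ _ (by omega) (by omega)]
        simpa using hmq
      · intro d hd1 hd2
        rw [PySem.List.pyGetD_eq_getElem _ _ (by omega) (by omega)]
        have := hmmin d.toNat (by omega)
        simpa using this
    rw [hAr]
    -- B side
    have hBr := pvFind_some (fun x => ((x.zip req).all (fun p => decide (p.2 ≤ p.1)))) pre 0 m
      hmlt hmq (fun j hj => hmmin j hj)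
    rw [hBr]
    simp
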